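-- pv_equiv track=rewrite | github.com/SugeilyCruz/Compiladores- | ProyectoFinalEquipo20/dataType.py | numeroFlotante
-- ===== SOURCE A (Python) =====
-- digitos = "0123456789"
--
-- punto = "."
--
-- def numeroFlotante(cad):      #Esta función se encarga de determinar si un valor es un flotante
--     p = 0
--     numFlot = True
--     if(cad[0] in digitos and cad[-1] in digitos):
--         for c in cad:
--             if not(c in digitos):
--                 if(c in punto):
--                     p = p + 1
--                 else:
--                     numFlot = False
--         if not(p == 1):
--             numFlot = False
--     else:
--         numFlot = False
--     return numFlot
-- ===== SOURCE B (Python) =====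
-- digitos = "0123456789"
--
-- punto = "."
--
-- def numeroFlotante(cad):
--     # split-based: guard on first/last char, then split on '.' and require
--     # exactly two parts, each made of digits only (no scan/counter over cad)
--     if cad[0] not in digitos or cad[-1] not in digitos:
--         return False
--     partes = cad.split(punto)
--     return len(partes) == 2 and all(all(c in digitos for c in p) for p in partes)
-- ===== Notes on version B (the rewrite author's own statement) =====
-- stated objective: simpler
-- what changed: Replaces A's single-pass state machine (dot counter p plus numFlot flag with a post-loop check) by string splitting: cad.split(punto) must yield exactly two parts and each part must be all ASCII digits; the single-dot rule falls out of the split structure instead of being counted.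
import Mathlib
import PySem

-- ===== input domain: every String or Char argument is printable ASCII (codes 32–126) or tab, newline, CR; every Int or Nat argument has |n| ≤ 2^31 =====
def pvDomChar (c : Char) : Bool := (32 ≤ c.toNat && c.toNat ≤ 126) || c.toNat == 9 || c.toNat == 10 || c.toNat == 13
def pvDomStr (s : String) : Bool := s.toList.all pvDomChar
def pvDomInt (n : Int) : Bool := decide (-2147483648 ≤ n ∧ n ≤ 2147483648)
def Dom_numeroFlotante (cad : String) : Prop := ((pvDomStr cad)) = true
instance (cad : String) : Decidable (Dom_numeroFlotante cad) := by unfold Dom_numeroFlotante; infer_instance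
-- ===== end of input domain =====

-- B replaces A's state-machine loop (dot counter + flag) by splitting at the dot separator
-- and checking the two parts are digit-only; objective: simpler. Pre_ excludes
-- the empty string, on which both Pythons raise IndexError (cad[0]).


-- ===== PORT A =====
-- module constant: digitos = "0123456789"
def pvDigitos : List Char := "0123456789".toList
-- module constant: punto = "."
def pvPunto : List Char := ".".toList
def numeroFlotante (cad : String) : Bool :=
  -- p = 0; numFlot = True
  match PySem.Str.pyGet? cad 0, PySem.Str.pyGet? cad (-1) with
  | some c0, some cl =>              -- cad[0], cad[-1]
    if c0 ∈ pvDigitos ∧ cl ∈ pvDigitos then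
      let st := cad.toList.foldl (fun (s : Int × Bool) c =>
        if ¬ (c ∈ pvDigitos) then
          if c ∈ pvPunto then (s.1 + 1, s.2)     -- p = p + 1
          else (s.1, false)                      -- numFlot = False
        else s) ((0 : Int), true)
      if ¬ (st.1 = 1) then false else st.2
    else false
  | _, _ => false                    -- IndexError on empty cad: excluded by Pre_

-- ===== PORT B =====
-- module constants (B-side copies): digitos, punto
def pvDigitosB : List Char := "0123456789".toList
def pvPuntoB : List Char := ".".toList
def numeroFlotante_alt (cad : String) : Bool :=
  match PySem.Str.pyGet? cad 0 with
  | none => false                    -- IndexError on empty cad: excluded by Pre_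
  | some c0 =>                       -- cad[0]
    match PySem.Str.pyGet? cad (-1) with
    | none => false
    | some cl =>                     -- cad[-1]
      if c0 ∉ pvDigitosB ∨ cl ∉ pvDigitosB then false
      else
        -- partes = cad.split(punto)
        let partes := PySem.Chars.splitOn cad.toList pvPuntoB
        decide (partes.length = 2) &&
          partes.all (fun p => p.all (fun c => decide (c ∈ pvDigitosB)))

-- ===== PRECONDITION & SPEC =====
-- Pre_ excludes only the empty string, on which A raises IndexError at cad[0].
def Pre_numeroFlotante (cad : String) : Prop := cad ≠ ""
instance (cad : String) : Decidable (Pre_numeroFlotante cad) := by unfold Pre_numeroFlotante; infer_instance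
def pvWitness_numeroFlotante : String := "3.14"
def Spec_numeroFlotante (cad : String) (out : Bool) : Prop := out = numeroFlotante_alt cad
instance (cad : String) (out : Bool) : Decidable (Spec_numeroFlotante cad out) := by unfold Spec_numeroFlotante; infer_instance

-- ===== CLAIM (what is proved, stated in full; the proofs are below) =====
def Claim_equal_numeroFlotante : Prop := ∀ (cad : String), Dom_numeroFlotante cad → Pre_numeroFlotante cad → Spec_numeroFlotante cad (numeroFlotante cad)

-- ===== LEMMAS AND PROOFS =====

-- A's loop computes the dot count and the "every char is digit-or-dot" flag.
theorem pvFoldA (l : List Char) (p : Int) (b : Bool) :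
    l.foldl (fun (s : Int × Bool) c =>
        if ¬ (c ∈ pvDigitos) then
          if c ∈ pvPunto then (s.1 + 1, s.2) else (s.1, false)
        else s) (p, b)
      = (p + l.count '.', b && l.all (fun c => decide (c ∈ pvDigitos) || decide (c = '.'))) := by
  induction l generalizing p b with
  | nil => simp
  | cons c t ih =>
    rw [List.foldl_cons]
    by_cases hd : c ∈ pvDigitos
    · have hne : ¬ (c = '.') := by
        intro h; subst h; revert hd; decide
      rw [if_neg (not_not_intro hd), ih]
      simp [hne, hd]
    · by_cases hp : c ∈ pvPunto
      · have he : c = '.' := by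
          simpa [pvPunto] using hp
        subst he
        rw [if_pos hd, if_pos hp, ih]
        refine Prod.ext ?_ ?_
        · simp; ring
        · simp
      · have hne : ¬ (c = '.') := by
          intro h; subst h; exact hp (by decide)
        rw [if_pos hd, if_neg hp, ih]
        simp [hne, hd]

-- reference splitter: pvMySplit pre l = the parts of (pre ++ l) split at '.',
-- where pre contains no dot (the part built so far)
def pvMySplit (pre : List Char) : List Char → List (List Char)
  | [] => [pre]
  | c :: t => if c = '.' then pre :: pvMySplit [] t else pvMySplit (pre ++ [c]) t

theorem pvGoEq (l : List Char) (fuel : Nat) (cur : List Char) (acc : List (List Char))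
    (h : l.length ≤ fuel) :
    PySem.Chars.splitOn.go ['.'] fuel l cur acc = acc.reverse ++ pvMySplit cur.reverse l := by
  induction l generalizing fuel cur acc with
  | nil => cases fuel <;> simp [PySem.Chars.splitOn.go, pvMySplit]
  | cons c t ih =>
    cases fuel with
    | zero => simp at h
    | succ f =>
      have ht : t.length ≤ f := by simpa using h
      by_cases hc : c = '.'
      · subst hc
        rw [show PySem.Chars.splitOn.go ['.'] (f+1) ('.' :: t) cur acc
              = PySem.Chars.splitOn.go ['.'] f (List.drop 1 ('.' :: t)) [] (cur.reverse :: acc) from by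
            simp [PySem.Chars.splitOn.go, List.isPrefixOf]]
        rw [List.drop_one, List.tail_cons, ih f [] (cur.reverse :: acc) ht]
        simp [pvMySplit]
      · rw [show PySem.Chars.splitOn.go ['.'] (f+1) (c :: t) cur acc
              = PySem.Chars.splitOn.go ['.'] f t (c :: cur) acc from by
            simp [PySem.Chars.splitOn.go, List.isPrefixOf, Ne.symm hc]]
        rw [ih f (c :: cur) acc ht]
        simp [pvMySplit, hc]

theorem pvMySplitLen (l : List Char) (pre : List Char) :
    (pvMySplit pre l).length = l.count '.' + 1 := by
  induction l generalizing pre with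
  | nil => simp [pvMySplit]
  | cons c t ih =>
    by_cases hc : c = '.'
    · subst hc; simp [pvMySplit, ih]
    · simp [pvMySplit, hc, ih]

theorem pvMySplitAll (l : List Char) (pre : List Char) :
    (pvMySplit pre l).all (fun p => p.all (fun c => decide (c ∈ pvDigitos)))
      = (pre.all (fun c => decide (c ∈ pvDigitos))
          && l.all (fun c => decide (c ∈ pvDigitos) || decide (c = '.'))) := by
  induction l generalizing pre with
  | nil => simp [pvMySplit]
  | cons c t ih =>
    by_cases hc : c = '.'
    · subst hc
      have hnd : ('.' : Char) ∉ pvDigitos := by decide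
      simp [pvMySplit, ih, hnd]
    · simp [pvMySplit, hc, ih, Bool.and_assoc]

-- ===== VERDICT (by name: the statement is the Claim_ definition above) =====
theorem numeroFlotante_spec : Claim_equal_numeroFlotante := by
  intro cad _ _
  unfold Spec_numeroFlotante numeroFlotante numeroFlotante_alt
  rw [show pvDigitosB = pvDigitos from rfl, show pvPuntoB = ['.'] from rfl]
  cases h0 : PySem.Str.pyGet? cad 0 with
  | none => cases h1 : PySem.Str.pyGet? cad (-1) <;> rfl
  | some c0 =>
    cases h1 : PySem.Str.pyGet? cad (-1) with
    | none => rfl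
    | some cl =>
      by_cases hg : c0 ∈ pvDigitos ∧ cl ∈ pvDigitos
      · have hng : ¬ (c0 ∉ pvDigitos ∨ cl ∉ pvDigitos) := by tauto
        simp only [hg]
        rw [pvFoldA cad.toList 0 true]
        have hsplit : PySem.Chars.splitOn cad.toList ['.'] = pvMySplit [] cad.toList := by
          unfold PySem.Chars.splitOn
          rw [pvGoEq cad.toList (cad.toList.length + 1) [] [] (by omega)]
          simp
        rw [hsplit, pvMySplitAll, pvMySplitLen]
        simp only [zero_add, List.all_nil, Bool.true_and]
        by_cases hp : (cad.toList.count '.' : Int) = 1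
        · have hn : cad.toList.count '.' = 1 := by exact_mod_cast hp
          simp [hn]
        · have hn : ¬ (cad.toList.count '.' + 1 = 2) := by
            intro h
            exact hp (by exact_mod_cast (show cad.toList.count '.' = 1 by omega))
          simp [hp, hn]
      · have hng : c0 ∉ pvDigitos ∨ cl ∉ pvDigitos := by tauto
        simp [hg, hng]
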